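-- pv_equiv track=rewrite | github.com/BillHallahan/G2 | tests/scripts/nofib-symbolic-functions.py | calculate_graph
-- ===== SOURCE A (Python) =====
-- def calculate_graph(tick_times):
--     if not tick_times:
--         return "(0, 0)"
--     count = 0
--     numTickMap = []
--     lastTickTime = tick_times[0][1]
--     for tick, time in tick_times:
--         if time != lastTickTime :
--             numTickMap.append((lastTickTime, count))
--             count = 1
--             lastTickTime = time
--         else:
--             count += 1
--     numTickMap.append((lastTickTime, count))
--
--     pair_strings = [f"({x}, {y})" for x, y in numTickMap]
--     coordinates = " ".join(pair_strings)
--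
--     return coordinates
-- ===== SOURCE B (Python) =====
-- def calculate_graph(tick_times):
--     if not tick_times:
--         return "(0, 0)"
--     times = [time for _, time in tick_times]
--     n = len(times)
--     starts = [i for i in range(n) if i == 0 or times[i] != times[i - 1]]
--     ends = starts[1:] + [n]
--     pair_strings = [f"({times[s]}, {e - s})" for s, e in zip(starts, ends)]
--     return " ".join(pair_strings)
-- ===== Notes on version B (the rewrite author's own statement) =====
-- stated objective: alternative
-- what changed: Replaces A's single-pass count/lastTickTime accumulator by staged index arithmetic: compute the list of run-start indices by filtering range(n) on adjacent inequality, pair each start with the next start via zip, and obtain each run's count as a difference of indices instead of counting.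
import Mathlib
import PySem

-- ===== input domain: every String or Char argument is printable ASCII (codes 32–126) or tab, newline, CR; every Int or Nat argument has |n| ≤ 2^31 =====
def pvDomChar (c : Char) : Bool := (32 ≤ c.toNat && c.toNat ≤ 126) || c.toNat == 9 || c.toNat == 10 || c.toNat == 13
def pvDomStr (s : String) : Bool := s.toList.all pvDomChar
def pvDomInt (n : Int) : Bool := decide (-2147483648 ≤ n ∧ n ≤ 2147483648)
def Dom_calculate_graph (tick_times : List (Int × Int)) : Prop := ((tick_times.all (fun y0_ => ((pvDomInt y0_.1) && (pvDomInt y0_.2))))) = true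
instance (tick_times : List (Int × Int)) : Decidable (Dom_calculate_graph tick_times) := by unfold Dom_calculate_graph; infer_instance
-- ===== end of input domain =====

-- B replaces A's count/lastTickTime accumulator by staged index arithmetic: run-start
-- indices filtered out of range(n), paired with their successors by zip, counts obtained
-- as index differences (objective: alternative).


-- ===== PORT A =====
-- f"({x}, {y})"
def pvFmt (x y : Int) : String :=
  "(" ++ PySem.Int.toStr x ++ ", " ++ PySem.Int.toStr y ++ ")"

-- one iteration of A's for-loop on the tick's time; state is (count, numTickMap, lastTickTime)
def pvStepA (st : Int × List (Int × Int) × Int) (time : Int) : Int × List (Int × Int) × Int :=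
  let (count, m, lastTickTime) := st
  if time ≠ lastTickTime then (1, m ++ [(lastTickTime, count)], time)
  else (count + 1, m, lastTickTime)

def calculate_graph (tick_times : List (Int × Int)) : String :=
  match tick_times with
  | [] => "(0, 0)"
  | (_, t0) :: _ =>
    let st := tick_times.foldl (fun st p => pvStepA st p.2) (0, [], t0)
    let numTickMap := st.2.1 ++ [(st.2.2, st.1)]
    let pair_strings := numTickMap.map (fun p => pvFmt p.1 p.2)
    PySem.Str.join " " pair_strings

-- ===== PORT B =====
-- the comprehension's filter condition: i == 0 or times[i] != times[i - 1]
def pvCond (times : List Int) (i : Int) : Bool :=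
  i == 0 || PySem.List.pyGetD times i 0 != PySem.List.pyGetD times (i - 1) 0

-- starts = [i for i in range(n) if i == 0 or times[i] != times[i - 1]]
def pvStarts (times : List Int) : List Int :=
  (PySem.List.pyRange 0 (times.length : Int) 1).filter (pvCond times)

def calculate_graph_alt (tick_times : List (Int × Int)) : String :=
  match tick_times with
  | [] => "(0, 0)"
  | _ :: _ =>
    let times := tick_times.map (fun p => p.2)
    let starts := pvStarts times
    let ends := PySem.List.slice starts (some 1) none ++ [(times.length : Int)]
    let pair_strings := (starts.zip ends).map
      (fun se => pvFmt (PySem.List.pyGetD times se.1 0) (se.2 - se.1))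
    PySem.Str.join " " pair_strings

-- ===== PRECONDITION & SPEC =====
def Spec_calculate_graph (tick_times : List (Int × Int)) (out : String) : Prop := out = calculate_graph_alt tick_times
instance (tick_times : List (Int × Int)) (out : String) : Decidable (Spec_calculate_graph tick_times out) := by unfold Spec_calculate_graph; infer_instance

-- ===== CLAIM (what is proved, stated in full; the proofs are below) =====
def Claim_equal_calculate_graph : Prop := ∀ (tick_times : List (Int × Int)), Dom_calculate_graph tick_times → Spec_calculate_graph tick_times (calculate_graph tick_times)

-- ===== LEMMAS AND PROOFS =====

-- the runs A's loop produces over the times list, starting inside a run of time lt counted `count` long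
def pvRuns (lt count : Int) : List Int → List (Int × Int)
  | [] => [(lt, count)]
  | t :: rest => if t ≠ lt then (lt, count) :: pvRuns t 1 rest else pvRuns lt (count + 1) rest

-- the formatted run strings, one maximal run at a time
def pvRunsT : List Int → List String
  | [] => []
  | t :: rest =>
    pvFmt t (1 + ((rest.takeWhile (· == t)).length : Int)) :: pvRunsT (rest.dropWhile (· == t))
termination_by ts => ts.length
decreasing_by
  have := List.length_dropWhile_le (· == t) rest
  simp_all

lemma pvRunsT_nil : pvRunsT [] = [] := by rw [pvRunsT.eq_def]

lemma pvRunsT_cons (t : Int) (rest : List Int) :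
    pvRunsT (t :: rest)
      = pvFmt t (1 + ((rest.takeWhile (· == t)).length : Int))
        :: pvRunsT (rest.dropWhile (· == t)) := by
  rw [pvRunsT.eq_def]

lemma foldA_eq_runs (ts : List Int) : ∀ (count : Int) (acc : List (Int × Int)) (lt : Int),
    (ts.foldl pvStepA (count, acc, lt)).2.1 ++ [((ts.foldl pvStepA (count, acc, lt)).2.2, (ts.foldl pvStepA (count, acc, lt)).1)]
      = acc ++ pvRuns lt count ts := by
  induction ts with
  | nil => intro count acc lt; simp [pvRuns]
  | cons t rest ih =>
    intro count acc lt
    simp only [List.foldl_cons, pvStepA, pvRuns]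
    by_cases h : t ≠ lt
    · simp only [if_pos h]
      rw [ih 1 (acc ++ [(lt, count)]) t]
      simp
    · simp only [if_neg h]
      exact ih (count + 1) acc lt

lemma runs_map_eq_runsT (ts : List Int) : ∀ (lt count : Int),
    (pvRuns lt count ts).map (fun p => pvFmt p.1 p.2)
      = pvFmt lt (count + ((ts.takeWhile (· == lt)).length : Int))
        :: pvRunsT (ts.dropWhile (· == lt)) := by
  induction ts with
  | nil => intro lt count; simp [pvRuns, pvRunsT_nil]
  | cons t rest ih =>
    intro lt count
    by_cases h : t = lt
    · subst h
      simp only [pvRuns, ne_eq, not_true_eq_false, if_false, List.takeWhile_cons,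
        List.dropWhile_cons, beq_self_eq_true, if_true]
      rw [ih t (count + 1)]
      congr 2
      simp only [List.length_cons]
      push_cast
      ring
    · have hb : (t == lt) = false := by simp [h]
      simp only [pvRuns, ne_eq, h, not_false_eq_true, if_true, List.takeWhile_cons,
        List.dropWhile_cons, hb, Bool.false_eq_true, if_false, List.map_cons, List.length_nil]
      rw [ih t 1, pvRunsT_cons]
      simp

-- elements of pvStarts are valid indices
lemma mem_starts {times : List Int} {i : Int} (h : i ∈ pvStarts times) :
    0 ≤ i ∧ i < (times.length : Int) := by
  unfold pvStarts at h
  have := List.mem_of_mem_filter h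
  exact (PySem.List.mem_pyRange_one.mp this)

lemma starts_nil : pvStarts [] = [] := by
  simp [pvStarts, PySem.List.pyRange_one_eq_nil]

-- every index inside the leading run of (t :: rest) reads t
lemma getT_run (t : Int) (rest : List Int) (j : Nat)
    (hj : j ≤ (rest.takeWhile (· == t)).length) :
    PySem.List.pyGetD (t :: rest) (j : Int) 0 = t := by
  rw [PySem.List.pyGetD_natCast]
  cases j with
  | zero => simp
  | succ j' =>
    have hlt : j' < (rest.takeWhile (· == t)).length := by omega
    have hle : (rest.takeWhile (· == t)).length ≤ rest.length := by
      have := congrArg List.length (List.takeWhile_append_dropWhile (p := (· == t)) (l := rest))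
      simp only [List.length_append] at this
      omega
    have hj' : j' < rest.length := lt_of_lt_of_le hlt hle
    have hpre : rest.takeWhile (· == t) <+: rest := List.takeWhile_prefix _
    have hget : rest[j'] = (rest.takeWhile (· == t))[j']'hlt := (hpre.getElem hlt).symm
    have hmem : (rest.takeWhile (· == t))[j']'hlt ∈ rest.takeWhile (· == t) := List.getElem_mem _
    have := List.mem_takeWhile_imp hmem
    simp only [beq_iff_eq] at this
    simp [List.getD_eq_getElem?_getD, List.getElem?_eq_getElem hj', hget, this]

-- dropping the leading run of (t :: rest)
lemma drop_run (t : Int) (rest : List Int) :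
    (t :: rest).drop ((rest.takeWhile (· == t)).length + 1) = rest.dropWhile (· == t) := by
  have h : rest.takeWhile (· == t) ++ rest.dropWhile (· == t) = rest :=
    List.takeWhile_append_dropWhile
  have h2 : (rest.takeWhile (· == t) ++ rest.dropWhile (· == t)).drop
      ((rest.takeWhile (· == t)).length) = rest.dropWhile (· == t) := List.drop_left
  rw [h] at h2
  simpa using h2

-- reading past the leading run is reading in the dropped tail
lemma get_shift (t : Int) (rest : List Int) (i : Int) (h0 : 0 ≤ i)
    (hm : i < ((rest.dropWhile (· == t)).length : Int)) :
    PySem.List.pyGetD (t :: rest) (((rest.takeWhile (· == t)).length : Int) + 1 + i) 0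
      = PySem.List.pyGetD (rest.dropWhile (· == t)) i 0 := by
  obtain ⟨j, rfl⟩ : ∃ j : Nat, i = (j : Int) := ⟨i.toNat, by omega⟩
  have hj : j < (rest.dropWhile (· == t)).length := by exact_mod_cast hm
  have hcast : (((rest.takeWhile (· == t)).length : Int) + 1 + (j : Int))
      = (((rest.takeWhile (· == t)).length + 1 + j : Nat) : Int) := by push_cast; ring
  rw [hcast, PySem.List.pyGetD_natCast, PySem.List.pyGetD_natCast]
  rw [List.getD_eq_getElem?_getD, List.getD_eq_getElem?_getD]
  have hget : (t :: rest)[(rest.takeWhile (· == t)).length + 1 + j]?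
      = (rest.dropWhile (· == t))[j]? := by
    rw [← drop_run t rest, List.getElem?_drop]
  rw [hget]
lemma length_split (t : Int) (rest : List Int) :
    rest.length = (rest.takeWhile (· == t)).length + (rest.dropWhile (· == t)).length := by
  have := congrArg List.length (List.takeWhile_append_dropWhile (p := (· == t)) (l := rest))
  simp only [List.length_append] at this
  omega

-- peel the leading run off pvStarts
lemma starts_cons (t : Int) (rest : List Int) :
    pvStarts (t :: rest)
      = 0 :: (pvStarts (rest.dropWhile (· == t))).map
          (fun i => ((rest.takeWhile (· == t)).length : Int) + 1 + i) := by
  set k := (rest.takeWhile (· == t)).length with hk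
  set R := rest.dropWhile (· == t) with hR
  set m := R.length with hm
  set r : Int := (k : Int) + 1 with hr
  have hsp : rest.length = k + m := by rw [hk, hm, hR]; exact length_split t rest
  have hrpos : 0 < r := by rw [hr]; omega
  have hlen : (((t :: rest).length : Int)) = r + (m : Int) := by
    simp only [List.length_cons, hsp, hr]
    push_cast
    ring
  unfold pvStarts
  rw [hlen, PySem.List.pyRange_one_append 0 r (r + (m : Int)) (by omega) (by omega),
    List.filter_append]
  have part1 : (PySem.List.pyRange 0 r 1).filter (pvCond (t :: rest)) = [0] := by
    rw [PySem.List.pyRange_one_cons hrpos, zero_add, List.filter_cons]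
    have h0 : pvCond (t :: rest) 0 = true := by simp [pvCond]
    rw [if_pos h0]
    have hnil : (PySem.List.pyRange 1 r 1).filter (pvCond (t :: rest)) = [] := by
      rw [List.filter_eq_nil_iff]
      intro i hi
      have hb := PySem.List.mem_pyRange_one.mp hi
      have hir : i < r := hb.2
      rw [hr] at hir
      obtain ⟨j, rfl⟩ : ∃ j : Nat, i = (j : Int) := ⟨i.toNat, by omega⟩
      have hj1 : 1 ≤ j := by exact_mod_cast hb.1
      have hjk : j ≤ k := by omega
      have e1 : PySem.List.pyGetD (t :: rest) (j : Int) 0 = t := getT_run t rest j (hk ▸ hjk)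
      have e2 : PySem.List.pyGetD (t :: rest) ((j : Int) - 1) 0 = t := by
        have hc : ((j : Int) - 1) = ((j - 1 : Nat) : Int) := by omega
        rw [hc]
        exact getT_run t rest (j - 1) (hk ▸ (by omega : j - 1 ≤ k))
      simp [pvCond, e1, e2]
      omega
    rw [hnil]
  have hrange : PySem.List.pyRange r (r + (m : Int)) 1
      = (List.range m).map (fun j : Nat => r + (j : Int)) := by
    rw [PySem.List.pyRange_one, add_sub_cancel_left, Int.toNat_natCast]
  have hrange0 : PySem.List.pyRange 0 ((m : Nat) : Int) 1
      = (List.range m).map (fun j : Nat => ((j : Nat) : Int)) := by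
    rw [PySem.List.pyRange_one]
    simp
  have part2 : (PySem.List.pyRange r (r + (m : Int)) 1).filter (pvCond (t :: rest))
      = (pvStarts R).map (fun i => r + i) := by
    rw [hrange, List.filter_map]
    unfold pvStarts
    rw [← hm, hrange0, List.filter_map, List.map_map]
    have hcond : ∀ j ∈ List.range m,
        ((pvCond (t :: rest)) ∘ (fun j : Nat => r + (j : Int))) j
        = ((pvCond R) ∘ (fun j : Nat => ((j : Nat) : Int))) j := by
      intro j hj
      have hjm : j < m := List.mem_range.mp hj
      simp only [Function.comp]
      have eshift : PySem.List.pyGetD (t :: rest) (r + (j : Int)) 0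
          = PySem.List.pyGetD R (j : Int) 0 := by
        rw [hr, hk, hR]
        exact get_shift t rest (j : Int) (by omega)
          (by rw [← hR, ← hm]; exact_mod_cast hjm)
      cases Nat.eq_zero_or_pos j with
      | inl hj0 =>
        subst hj0
        have hRne : R ≠ [] := by
          intro hcon
          rw [hm, hcon] at hjm
          simp at hjm
        have e2 : PySem.List.pyGetD (t :: rest) (r + ((0 : Nat) : Int) - 1) 0 = t := by
          have hc : (r + ((0 : Nat) : Int) - 1) = ((k : Nat) : Int) := by rw [hr]; omega
          rw [hc]
          exact getT_run t rest k (le_of_eq hk)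
        obtain ⟨a, l, hRc⟩ := List.exists_cons_of_ne_nil hRne
        have hdw : rest.dropWhile (· == t) = a :: l := hR.symm.trans hRc
        have hw : rest.dropWhile (· == t) ≠ [] := by rw [hdw]; simp
        have h1 : (rest.dropWhile (· == t)).head? = some a := by rw [hdw]; rfl
        have h2 : (rest.dropWhile (· == t)).head? = some ((rest.dropWhile (· == t)).head hw) :=
          List.head?_eq_some_head hw
        have ha : (rest.dropWhile (· == t)).head hw = a := by
          rw [h2] at h1
          exact Option.some.inj h1
        have hpa : (a == t) = false := by
          have h3 := List.head_dropWhile_not (· == t) hw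
          rw [ha] at h3
          exact h3
        have hhead : PySem.List.pyGetD R ((0 : Nat) : Int) 0 = a := by
          rw [PySem.List.pyGetD_natCast, hRc]
          simp
        have hne : a ≠ t := beq_eq_false_iff_ne.mp hpa
        have hcT : pvCond (t :: rest) (r + ((0 : Nat) : Int)) = true := by
          simp only [pvCond, eshift, hhead, e2]
          simp [hne]
        rw [hcT]
        simp [pvCond]
      | inr hjpos =>
        have eshift' : PySem.List.pyGetD (t :: rest) (r + (j : Int) - 1) 0
            = PySem.List.pyGetD R ((j : Int) - 1) 0 := by
          have h1 : r + (j : Int) - 1 = r + ((j - 1 : Nat) : Int) := by omega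
          have h2 : ((j : Int) - 1) = ((j - 1 : Nat) : Int) := by omega
          rw [h1, h2, hr, hk, hR]
          exact get_shift t rest ((j - 1 : Nat) : Int) (by omega) (by
            rw [← hR, ← hm]
            have hc : ((j - 1 : Nat) : Int) < (m : Int) := by omega
            exact hc)
        have hrj : (r + (j : Int) == 0) = false := by
          simp only [beq_eq_false_iff_ne, ne_eq]
          rw [hr]
          omega
        have hjz : (((j : Nat) : Int) == 0) = false := by
          simp only [beq_eq_false_iff_ne, ne_eq]
          omega
        simp only [pvCond, hrj, hjz, eshift, eshift', Bool.false_or]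
    rw [List.filter_congr hcond]
    simp [Function.comp]
  rw [part1, part2]
  simp [pvStarts]

-- B's zip of starts with shifted starts, formatted, is exactly the run strings
lemma zipfmt_eq_runsT (T : List Int) (hT : T ≠ []) :
    ((pvStarts T).zip ((pvStarts T).tail ++ [(T.length : Int)])).map
        (fun se => pvFmt (PySem.List.pyGetD T se.1 0) (se.2 - se.1))
      = pvRunsT T := by
  match T with
  | t :: rest =>
    set k := (rest.takeWhile (· == t)).length with hk
    set R := rest.dropWhile (· == t) with hR
    set m := R.length with hm
    set r : Int := (k : Int) + 1 with hr
    have hsp : rest.length = k + m := by rw [hk, hm, hR]; exact length_split t rest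
    have hlen : (((t :: rest).length : Int)) = r + (m : Int) := by
      simp only [List.length_cons, hsp, hr]
      push_cast
      ring
    have hstart : pvStarts (t :: rest) = 0 :: (pvStarts R).map (fun i => r + i) :=
      starts_cons t rest
    have hhead0 : PySem.List.pyGetD (t :: rest) 0 0 = t := by
      have h0 := getT_run t rest 0 (Nat.zero_le _)
      rw [Nat.cast_zero] at h0
      exact h0
    rw [pvRunsT_cons]
    cases hRcase : R with
    | nil =>
      have hm0 : m = 0 := by rw [hm, hRcase]; rfl
      have : pvStarts R = [] := by rw [hRcase]; exact starts_nil
      rw [hstart, this]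
      simp only [List.map_nil, List.tail_cons, List.nil_append, List.zip_cons_cons,
        List.zip_nil_right, List.map_cons, List.map_nil]
      have hdw : rest.dropWhile (· == t) = [] := hR.symm.trans hRcase
      have harg : r + (m : Int) - 0 = 1 + ((rest.takeWhile (· == t)).length : Int) := by
        rw [← hk]
        omega
      rw [hdw, pvRunsT_nil, hhead0, hlen, harg]
    | cons t' rest' =>
      have hRne : R ≠ [] := by rw [hRcase]; simp
      obtain ⟨l, hl⟩ : ∃ l, pvStarts R = 0 :: l := by
        rw [hRcase]
        exact ⟨_, starts_cons t' rest'⟩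
      have hRlt : R.length < (t :: rest).length := by
        simp only [List.length_cons]
        rw [← hm]
        omega
      have ih := zipfmt_eq_runsT R hRne
      rw [hstart, hl]
      simp only [List.map_cons, List.tail_cons, List.cons_append]
      rw [List.zip_cons_cons, List.map_cons]
      have hmapsh : l.map (fun i => r + i) ++ [((t :: rest).length : Int)]
          = (l ++ [(m : Int)]).map (fun i => r + i) := by
        rw [List.map_append, hlen]
        simp
      rw [hmapsh]
      have hzipmap : ((0 :: l).map (fun i => r + i)).zip ((l ++ [(m : Int)]).map (fun i => r + i))
          = ((0 :: l).zip (l ++ [(m : Int)])).map (Prod.map (fun i => r + i) (fun i => r + i)) :=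
        List.zip_map
      have hconsmap : (r + 0) :: l.map (fun i => r + i) = (0 :: l).map (fun i => r + i) := by
        simp
      rw [hconsmap, hzipmap, List.map_map]
      have hcongr : ∀ se ∈ (0 :: l).zip (l ++ [(m : Int)]),
          ((fun se => pvFmt (PySem.List.pyGetD (t :: rest) se.1 0) (se.2 - se.1))
            ∘ (Prod.map (fun i => r + i) (fun i => r + i))) se
          = (fun se => pvFmt (PySem.List.pyGetD R se.1 0) (se.2 - se.1)) se := by
        intro se hse
        have hmemfst : se.1 ∈ pvStarts R := by
          rw [hl]
          exact (List.of_mem_zip hse).1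
        have hb := mem_starts hmemfst
        simp only [Function.comp, Prod.map]
        have eshift : PySem.List.pyGetD (t :: rest) (r + se.1) 0
            = PySem.List.pyGetD R se.1 0 := by
          rw [hr, hk]
          exact get_shift t rest se.1 hb.1 (by rw [← hR, ← hm]; exact hb.2)
        rw [eshift]
        congr 1
        omega
      rw [List.map_congr_left hcongr, ← hl]
      have htail : (pvStarts R).tail = l := by rw [hl, List.tail_cons]
      rw [htail, ← hm] at ih
      rw [ih]
      congr 1
      show pvFmt (PySem.List.pyGetD (t :: rest) (0, r + 0).1 0) ((0, r + 0).2 - (0, r + 0).1)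
          = pvFmt t (1 + ((rest.takeWhile (· == t)).length : Int))
      rw [hhead0]
      congr 1
      rw [← hk]
      omega
  termination_by T.length
  decreasing_by
    exact hRlt

-- ===== VERDICT (by name: the statement is the Claim_ definition above) =====
theorem calculate_graph_spec : Claim_equal_calculate_graph := by
  intro ts _
  unfold Spec_calculate_graph calculate_graph calculate_graph_alt
  match ts with
  | [] => rfl
  | (x, t) :: rest =>
    simp only
    congr 1
    have hfold : ((x, t) :: rest).foldl (fun st p => pvStepA st p.2) (0, [], t)
        = (((x, t) :: rest).map (fun p => p.2)).foldl pvStepA (0, [], t) := by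
      rw [List.foldl_map]
    rw [hfold]
    set T := ((x, t) :: rest).map (fun p => p.2) with hTdef
    have hTne : T ≠ [] := by simp [hTdef]
    rw [foldA_eq_runs T 0 [] t]
    simp only [List.nil_append]
    have hTc : T = t :: rest.map (fun p => p.2) := by simp [hTdef]
    have h0 : pvRuns t 0 T = pvRuns t 1 (rest.map (fun p => p.2)) := by
      rw [hTc]; simp [pvRuns]
    rw [h0, runs_map_eq_runsT (rest.map (fun p => p.2)) t 1, ← pvRunsT_cons, ← hTc]
    rw [← zipfmt_eq_runsT T hTne]
    rw [PySem.List.slice_from_one]
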